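/- GENERATED by mk_final_copies.py from the proof of the farm's unit `imdct_step3_inner_s_loop.1` (farm:imdct_step3_inner_s_loop.1.2: Proof.lean) as the
   re-elaboration sweep compiled it — do not edit. -/
import Asan.CheckWalk
import Vorbis.Spec.Units.imdct_step3_inner_s_loop_1
open X86 X86.User Asan Vorbis Vorbis.Spec

set_option maxRecDepth 4000
set_option maxHeartbeats 4000000

namespace Vorbis.Spec.imdct_step3_inner_s_loop_1

/-- A dword spilled to the stack and reloaded (`mov [rsp+8], edx` … `movsxd rax, [rsp+8]`): the walker's form of the reloaded
value is the value. -/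
theorem reload32_eq (x : BitVec 32) : BitVec.ofNat 32 (x.toNat % 4294967296) = x := by
  apply BitVec.eq_of_toNat_eq
  rw [BitVec.toNat_ofNat]
  omega

/-- The 32-bit sum `x + x` as the walker writes `lea eax, [rbp + rbp]` (0x105f81, C line 2537: `a_off*2`), for a small `x`. -/
theorem twice_toNat (x : BitVec 32) (h : x.toNat < 2 ^ 29) :
    (BitVec.setWidth 32 (Word.ofBV x + Word.ofBV x).toBitVec).toNat = 2 * x.toNat := by
  rw [BitVec.toNat_setWidth, UInt64.toNat_toBitVec, UInt64.toNat_add, toNat_ofBV32]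
  omega

/-- `lea eax, [rbp + rbp]` then `movsxd r12, eax` (0x105f81, 0x105f89): twice a small non-negative `int`, sign-extended, is the
number `2 x`. -/
theorem sext_twice (x : BitVec 32) (h : x.toNat < 2 ^ 29) :
    (Word.ofBV (BitVec.signExtend 64 (BitVec.setWidth 32 (Word.ofBV x + Word.ofBV x).toBitVec))).toNat = 2 * x.toNat := by
  have e := twice_toNat x h
  rw [toNat_sext32 _ (by omega), e]

/-- `add ebp, eax` (`eax = 2 a_off` reloaded from its slot) then `movsxd rbp, ebp` (0x105fc0, 0x105fc2; C line 2539: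
`a_off*3`): three times a small non-negative `int`, sign-extended, is the number `3 x`. -/
theorem sext_thrice (x : BitVec 32) (h : x.toNat < 2 ^ 29) :
    (Word.ofBV (BitVec.signExtend 64 (x + BitVec.ofNat 32
      ((BitVec.setWidth 32 (Word.ofBV x + Word.ofBV x).toBitVec).toNat % 4294967296)))).toNat = 3 * x.toNat := by
  have e := twice_toNat x h
  have e3 : (x + BitVec.ofNat 32
      ((BitVec.setWidth 32 (Word.ofBV x + Word.ofBV x).toBitVec).toNat % 4294967296)).toNat = 3 * x.toNat := by
    rw [BitVec.toNat_add, BitVec.toNat_ofNat, e]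
    omega
  rw [toNat_sext32 _ (by omega), e3]

end Vorbis.Spec.imdct_step3_inner_s_loop_1

open Vorbis.Spec.imdct_step3_inner_s_loop_1

/-- Segment 1 of `imdct_step3_inner_s_loop` (the function's entry 0x105f00 … the loop head `loop1` = 0x1062bc, C lines
2531–2547): six pushes, the arguments spilled, the eight twiddle factors `A[j a_off + d]` loaded (8 `load4` checks, each inside
the live range `A[0 .. 3 a_off + 1]` of the precondition) and spilled, `ee0` / `ee2` set up. The exit assertion `AtHead … 0` is
built from the walker's facts. -/
theorem Vorbis.Spec.Worked.imdct_step3_inner_s_loop_1_ok : Vorbis.Spec.imdct_step3_inner_s_loop_1.Statement := by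
  intro Lay hLay μ hμ u₀ hcode hload4 others frames len i0 koff k0 aoff ue ret he hpre
  have he0 := he
  have hpre0 := hpre
  v_entry he
  obtain ⟨hsh, hn31, hi0, hneg, haoff, ha29, hk0, hk31, hstride, hlive, hA⟩ := hpre
  have hsp := hsh.rsp
  -- where the twiddle factors and the buffer are: inside the data space, no wrap-around
  have hAw := hA.where_ hsh.inv hsh.offText (by omega) (by omega)
  have hhi := hstride.hi
  have hlo := hstride.lo
  have hEw := hlive.where_ hsh.inv hsh.offText (by omega) (by omega)
  -- `a_off`, `2 a_off`, `3 a_off` sign-extended, as numbers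
  have hx : (Word.part .w32 (ue.reg .r9)).toNat = aoff := by
    rw [part32_toNat, ← arg32_def]
    exact haoff
  have e1 : (Word.ofBV (BitVec.signExtend 64 (Word.part .w32 (ue.reg .r9)))).toNat = aoff := by
    rw [toNat_sext32 _ (by omega)]
    exact hx
  have e2 := sext_twice (Word.part .w32 (ue.reg .r9)) (by omega)
  have e3 := sext_thrice (Word.part .w32 (ue.reg .r9)) (by omega)
  rw [hx] at e2 e3
  -- the three pointers `A + 4 j a_off`
  have p1 := add_mul4 (ue.reg .r8) _ aoff e1 (by omega)
  have p2 := add_mul4 (ue.reg .r8) _ (2 * aoff) e2 (by omega)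
  have p3 := add_mul4 (ue.reg .r8) _ (3 * aoff) e3 (by omega)
  u_walk hcode [hμ.vendor] until [Vorbis.L.imdct_step3_inner_s_loop.loop1] span [Vorbis.L.textLo, Vorbis.L.textHi] side (v_side)
  · -- 0x105f2b, C line 2533: A[0]
    have hun : ShadowUntouched ue.mem s_105f2b.mem := by v_untouched
    exact hA.accSmall hsh.inv hun _ 4 (by decide) (by u_omega) (by u_omega)
  · -- 0x105f3e, C line 2534: A[1]
    have hun : ShadowUntouched ue.mem s_105f3e.mem := by v_untouched
    exact hA.accSmall hsh.inv hun _ 4 (by decide) (by u_omega) (by u_omega)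
  · -- 0x105f58, C line 2535: A[a_off]
    have hun : ShadowUntouched ue.mem s_105f58.mem := by v_untouched
    exact hA.accSmall hsh.inv hun _ 4 (by decide) (by u_omega) (by u_omega)
  · -- 0x105f70, C line 2536: A[a_off + 1]
    have hun : ShadowUntouched ue.mem s_105f70.mem := by v_untouched
    exact hA.accSmall hsh.inv hun _ 4 (by decide) (by u_omega) (by u_omega)
  · -- 0x105f93, C line 2537: A[2 a_off]
    have hun : ShadowUntouched ue.mem s_105f93.mem := by v_untouched
    exact hA.accSmall hsh.inv hun _ 4 (by decide) (by u_omega) (by u_omega)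
  · -- 0x105fab, C line 2538: A[2 a_off + 1]
    have hun : ShadowUntouched ue.mem s_105fab.mem := by v_untouched
    exact hA.accSmall hsh.inv hun _ 4 (by decide) (by u_omega) (by u_omega)
  · -- 0x105fcc, C line 2539: A[3 a_off]
    have hun : ShadowUntouched ue.mem s_105fcc.mem := by v_untouched
    exact hA.accSmall hsh.inv hun _ 4 (by decide) (by u_omega) (by u_omega)
  · -- 0x105fe5, C line 2540: A[3 a_off + 1]
    have hun : ShadowUntouched ue.mem s_105fe5.mem := by v_untouched
    exact hA.accSmall hsh.inv hun _ 4 (by decide) (by u_omega) (by u_omega)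
  -- the exit at the loop head `loop1` (0x1062bc, C line 2547) with `s = 0`: the assertion `AtHead`, field by field
  refine ReachVia.done ⟨w_rip, ?_⟩
  -- the four 32-bit arguments as numbers
  have edx : (Word.ofBV (BitVec.signExtend 64 (BitVec.ofNat 32
      ((Word.part .w32 (ue.reg .rdx)).toNat % 4294967296)))).toNat = i0 := by
    rw [reload32_eq, arg32_sext ue .rdx (by omega)]
    exact hi0
  have ecx : (Word.ofBV (BitVec.signExtend 64 (BitVec.ofNat 32
      ((Word.part .w32 (ue.reg .rcx)).toNat % 4294967296)))).toNat = 2 ^ 64 - koff := by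
    rw [reload32_eq]
    exact hneg.sext
  obtain ⟨hk1, hk2, _⟩ := hneg
  have q0 := add_mul4 (ue.reg .rsi) _ i0 edx (by omega)
  refine ⟨⟨he0, hpre0, w_eq, ?abi, ⟨w_rsp, ?_, ?_, ?_, ?_, ?_, ?_, ?_⟩, ?same, ?shadow⟩, Nat.zero_le _, ?cnt, ?k0reg, ?ee0, ?ee2⟩
  case abi => v_inv
  case same =>
    simp only [X86.User.Spec.footprint, vspec]
    u_same
  case shadow => v_untouched
  case cnt =>
    rw [w_r13, toNat_ofBV32, part32_toNat, arg32_def]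
    omega
  case k0reg =>
    rw [w_r15, toNat_ofBV32, toNat_ofNat32 _ (by omega)]
  case ee0 =>
    -- (the field is guarded by `0 < n'` since freeze-8; it holds without the guard here)
    intro _
    rw [w_rbp, q0]
    omega
  case ee2 =>
    -- (guarded likewise)
    intro _
    rw [w_rbx, add_neg_mul4 _ _ koff ecx hk1 (by rw [q0]; omega), q0]
    omega
  all_goals u_resolve
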